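-- pv_equiv track=rewrite | github.com/Togather-Foundation/server | scripts/extract_opencode_instructions.py | strip_tool_output
-- ===== SOURCE A (Python) =====
-- def strip_tool_output(text):
--     lines = text.splitlines()
--     cleaned = []
--     skip_block = False
--     skip_until_end_marker = False
--     for line in lines:
--         if skip_until_end_marker:
--             if line.strip().startswith("(End of file"):
--                 skip_until_end_marker = False
--             continue
--         if skip_block:
--             if line.strip().lower().startswith("</file>"):
--                 skip_block = False
--             continue
--         if "Called the Read tool with the following input:" in line:
--             skip_block = True
--             continue
--         if line.strip().startswith("<file>"):
--             skip_until_end_marker = True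
--             continue
--         cleaned.append(line)
--     return "\n".join(cleaned)
-- ===== SOURCE B (Python) =====
-- def strip_tool_output(text):
--     lines = text.splitlines()
--     cleaned = []
--     i = 0
--     n = len(lines)
--     while i < n:
--         line = lines[i]
--         if "Called the Read tool with the following input:" in line:
--             i += 1
--             while i < n and not lines[i].strip().lower().startswith("</file>"):
--                 i += 1
--             i += 1  # step past the closing marker (or past the end)
--             continue
--         if line.strip().startswith("<file>"):
--             i += 1
--             while i < n and not lines[i].strip().startswith("(End of file"):
--                 i += 1
--             i += 1
--             continue
--         cleaned.append(line)
--         i += 1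
--     return "\n".join(cleaned)
-- ===== Notes on version B (the rewrite author's own statement) =====
-- stated objective: alternative
-- what changed: Replaces the two persistent boolean flags threaded through a single for-loop by an explicit index with an outer while loop and two dedicated inner skip loops that consume each block (including its end marker) on the spot.
import Mathlib
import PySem

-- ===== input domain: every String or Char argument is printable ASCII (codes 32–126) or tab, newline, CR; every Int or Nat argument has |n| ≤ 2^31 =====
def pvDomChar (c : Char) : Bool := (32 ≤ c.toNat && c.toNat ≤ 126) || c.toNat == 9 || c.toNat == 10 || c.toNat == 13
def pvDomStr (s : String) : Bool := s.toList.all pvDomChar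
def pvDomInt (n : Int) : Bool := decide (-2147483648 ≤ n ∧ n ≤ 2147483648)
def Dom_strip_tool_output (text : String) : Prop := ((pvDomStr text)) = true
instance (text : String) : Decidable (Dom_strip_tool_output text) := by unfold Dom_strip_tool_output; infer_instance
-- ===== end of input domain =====

-- B replaces A's two persistent boolean flags with an explicit-index outer loop and two
-- dedicated inner skip loops (alternative decomposition, same cost).

-- ===== PORT A =====
-- One fold step of A's for-loop; state = (cleaned, skip_block, skip_until_end_marker).
def aStep (st : List String × Bool × Bool) (line : String) : List String × Bool × Bool :=
  let acc := st.1; let sb := st.2.1; let sm := st.2.2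
  if sm then
    if PySem.Str.startswith (PySem.Str.strip line) "(End of file" then (acc, sb, false)
    else (acc, sb, sm)
  else if sb then
    if PySem.Str.startswith (PySem.Str.lower (PySem.Str.strip line)) "</file>" then (acc, false, sm)
    else (acc, sb, sm)
  else if PySem.Str.isIn "Called the Read tool with the following input:" line then (acc, true, sm)
  else if PySem.Str.startswith (PySem.Str.strip line) "<file>" then (acc, sb, true)
  else (acc ++ [line], sb, sm)

def strip_tool_output (text : String) : String :=
  PySem.Str.join "\n" ((PySem.Str.splitlines text).foldl aStep ([], false, false)).1

-- ===== PORT B =====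
-- Inner while of B: advance past lines until (and including) the "</file>" marker.
def dropThroughFile : List String → List String
  | [] => []
  | l :: rest =>
    if PySem.Str.startswith (PySem.Str.lower (PySem.Str.strip l)) "</file>" then rest
    else dropThroughFile rest

-- Inner while of B: advance past lines until (and including) the "(End of file" marker.
def dropThroughEOF : List String → List String
  | [] => []
  | l :: rest =>
    if PySem.Str.startswith (PySem.Str.strip l) "(End of file" then rest
    else dropThroughEOF rest

theorem dropThroughFile_length_le (ls : List String) :
    (dropThroughFile ls).length ≤ ls.length := by
  induction ls with
  | nil => simp [dropThroughFile]
  | cons l rest ih =>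
    simp only [dropThroughFile]
    split
    · simp
    · simp; omega

theorem dropThroughEOF_length_le (ls : List String) :
    (dropThroughEOF ls).length ≤ ls.length := by
  induction ls with
  | nil => simp [dropThroughEOF]
  | cons l rest ih =>
    simp only [dropThroughEOF]
    split
    · simp
    · simp; omega

-- Outer while loop of B over the remaining lines, cleaned built front-to-back.
def altGo : List String → List String
  | [] => []
  | l :: rest =>
    if PySem.Str.isIn "Called the Read tool with the following input:" l then
      altGo (dropThroughFile rest)
    else if PySem.Str.startswith (PySem.Str.strip l) "<file>" then
      altGo (dropThroughEOF rest)
    else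
      l :: altGo rest
termination_by ls => ls.length
decreasing_by
  · exact Nat.lt_succ_of_le (dropThroughFile_length_le rest)
  · exact Nat.lt_succ_of_le (dropThroughEOF_length_le rest)
  · exact Nat.lt_succ_self _

def strip_tool_output_alt (text : String) : String :=
  PySem.Str.join "\n" (altGo (PySem.Str.splitlines text))

-- ===== PRECONDITION & SPEC =====
def Spec_strip_tool_output (text : String) (out : String) : Prop := out = strip_tool_output_alt text
instance (text : String) (out : String) : Decidable (Spec_strip_tool_output text out) := by unfold Spec_strip_tool_output; infer_instance

-- ===== CLAIM (what is proved, stated in full; the proofs are below) =====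
def Claim_equal_strip_tool_output : Prop := ∀ (text : String), Dom_strip_tool_output text → Spec_strip_tool_output text (strip_tool_output text)

-- ===== LEMMAS AND PROOFS =====

-- While skip_block is set, A only scans for the "</file>" line: same effect as B's inner loop.
theorem foldl_aStep_sb (ls : List String) (acc : List String) :
    (List.foldl aStep (acc, true, false) ls).1
      = (List.foldl aStep (acc, false, false) (dropThroughFile ls)).1 := by
  induction ls generalizing acc with
  | nil => simp [dropThroughFile]
  | cons l rest ih =>
    by_cases h : PySem.Chars.startswith (PySem.Chars.lower (PySem.Chars.strip l.toList))
        ['<', '/', 'f', 'i', 'l', 'e', '>'] = true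
    · simp [dropThroughFile, aStep, h]
    · simp [dropThroughFile, aStep, h]
      simpa using ih acc

-- While skip_until_end_marker is set, A only scans for the "(End of file" line.
theorem foldl_aStep_sm (ls : List String) (acc : List String) :
    (List.foldl aStep (acc, false, true) ls).1
      = (List.foldl aStep (acc, false, false) (dropThroughEOF ls)).1 := by
  induction ls generalizing acc with
  | nil => simp [dropThroughEOF]
  | cons l rest ih =>
    by_cases h : PySem.Chars.startswith (PySem.Chars.strip l.toList)
        ['(', 'E', 'n', 'd', ' ', 'o', 'f', ' ', 'f', 'i', 'l', 'e'] = true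
    · simp [dropThroughEOF, aStep, h]
    · simp [dropThroughEOF, aStep, h]
      simpa using ih acc

-- In the normal state A's fold accumulates exactly B's altGo output.
theorem foldl_aStep_eq_altGo (n : Nat) (ls : List String) (hn : ls.length ≤ n)
    (acc : List String) :
    (List.foldl aStep (acc, false, false) ls).1 = acc ++ altGo ls := by
  induction n generalizing ls acc with
  | zero =>
    have : ls = [] := List.eq_nil_of_length_eq_zero (Nat.le_zero.mp hn)
    subst this; simp [altGo]
  | succ n ih =>
    cases ls with
    | nil => simp [altGo]
    | cons l rest =>
      simp only [List.length_cons, Nat.succ_le_succ_iff] at hn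
      rw [List.foldl_cons, altGo]
      by_cases h1 : PySem.Str.isIn "Called the Read tool with the following input:" l = true
      · simp only [aStep, h1, if_pos, Bool.false_eq_true, if_false]
        rw [foldl_aStep_sb, ih _ (le_trans (dropThroughFile_length_le rest) hn)]
      · by_cases h2 : PySem.Str.startswith (PySem.Str.strip l) "<file>" = true
        · simp only [aStep, h1, h2, Bool.false_eq_true, if_false, if_true]
          rw [foldl_aStep_sm, ih _ (le_trans (dropThroughEOF_length_le rest) hn)]
        · simp only [aStep, h1, h2, Bool.false_eq_true, if_false]
          rw [ih _ hn]
          simp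

-- ===== VERDICT (by name: the statement is the Claim_ definition above) =====
theorem strip_tool_output_spec : Claim_equal_strip_tool_output := by
  intro text _
  unfold Spec_strip_tool_output strip_tool_output strip_tool_output_alt
  rw [foldl_aStep_eq_altGo (PySem.Str.splitlines text).length _ le_rfl []]
  simp
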